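-- pv_equiv track=rewrite | github.com/AyaanaPS/Caltech-CS1 | Lab4/lab4_b.py | remove_value
-- ===== SOURCE A (Python) =====
-- def remove_value(dictionary, value):
-- 	'''Removes all key/value pairs from the dictionary that equal the
-- 	inputted value.'''
-- 	lst = []
-- 	for key in dictionary:
-- 		if dictionary[key] == value:
-- 			lst.append(key)
-- 	for i in lst:
-- 		del dictionary[i]
-- 	return dictionary
-- ===== SOURCE B (Python) =====
-- def remove_value(dictionary, value):
--     '''Removes all key/value pairs from the dictionary that equal the
--     inputted value.'''
--     keep = {k: v for k, v in dictionary.items() if v != value}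
--     dictionary.clear()
--     dictionary.update(keep)
--     return dictionary
-- ===== Notes on version B (the rewrite author's own statement) =====
-- stated objective: simpler
-- what changed: B builds the complement (the items to keep) in one filtering pass and rebuilds the dict in place via clear()+update(), instead of collecting a deletion list of keys (with a lookup per key) and deleting them one by one.
import Mathlib
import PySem

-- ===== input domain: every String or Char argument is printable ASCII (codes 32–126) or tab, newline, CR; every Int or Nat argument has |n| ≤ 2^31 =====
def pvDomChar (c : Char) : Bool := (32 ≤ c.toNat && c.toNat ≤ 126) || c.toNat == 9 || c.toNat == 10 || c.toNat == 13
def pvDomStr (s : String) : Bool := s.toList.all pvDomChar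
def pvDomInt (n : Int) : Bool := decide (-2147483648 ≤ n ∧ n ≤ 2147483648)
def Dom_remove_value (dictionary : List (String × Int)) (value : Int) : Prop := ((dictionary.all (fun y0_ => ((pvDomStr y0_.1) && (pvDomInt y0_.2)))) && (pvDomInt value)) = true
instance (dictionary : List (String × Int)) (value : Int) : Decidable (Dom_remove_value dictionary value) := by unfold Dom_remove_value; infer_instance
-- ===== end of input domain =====

-- B rebuilds the dict from the items to KEEP (one filtering comprehension + clear/update)
-- instead of A's collect-a-deletion-list-of-keys-then-delete-each; same mutation of the
-- argument in place (both Pythons return the mutated input dict; equivalence here is about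
-- the returned association list).

-- ===== PORT A =====
-- 'for key in dictionary: if dictionary[key] == value: lst.append(key)' then 'for i in lst: del dictionary[i]'.
-- dictionary[key] is first-match lookup (List.lookup); 'del dictionary[i]' removes the entry
-- with key i — ported by hand as a filter on the key, exact since Pre_ guarantees unique keys.
def remove_value (dictionary : List (String × Int)) (value : Int) : List (String × Int) :=
  let lst := dictionary.foldl
    (fun acc kv => if List.lookup kv.1 dictionary == some value then acc ++ [kv.1] else acc) []
  lst.foldl (fun d k => d.filter (fun kv => kv.1 ≠ k)) dictionary

-- ===== PORT B =====
-- keep = {k: v for k, v in dictionary.items() if v != value}; dictionary.clear(); dictionary.update(keep)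
-- (the rebuilt dict's item list is exactly the filtered item list, keys being unique).
def remove_value_alt (dictionary : List (String × Int)) (value : Int) : List (String × Int) :=
  dictionary.filter (fun kv => kv.2 != value)

-- ===== PRECONDITION & SPEC =====
-- Pre_: the association list represents a Python dict, i.e. its keys are distinct
-- (a list with duplicate keys does not correspond to any Python input of A).
def Pre_remove_value (dictionary : List (String × Int)) (value : Int) : Prop :=
  (dictionary.map Prod.fst).Nodup
instance (dictionary : List (String × Int)) (value : Int) : Decidable (Pre_remove_value dictionary value) := by unfold Pre_remove_value; infer_instance

def pvWitness_remove_value : (List (String × Int)) × Int := ([("a", 1), ("b", 2), ("c", 1)], 1)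

def Spec_remove_value (dictionary : List (String × Int)) (value : Int) (out : List (String × Int)) : Prop := out = remove_value_alt dictionary value
instance (dictionary : List (String × Int)) (value : Int) (out : List (String × Int)) : Decidable (Spec_remove_value dictionary value out) := by unfold Spec_remove_value; infer_instance

-- ===== CLAIM (what is proved, stated in full; the proofs are below) =====
def Claim_equal_remove_value : Prop := ∀ (dictionary : List (String × Int)) (value : Int), Dom_remove_value dictionary value → Pre_remove_value dictionary value → Spec_remove_value dictionary value (remove_value dictionary value)

-- ===== LEMMAS AND PROOFS =====

-- Deleting each key of ks from d is one filter on non-membership in ks.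
theorem foldl_filter_key (ks : List String) (d : List (String × Int)) :
    ks.foldl (fun d k => d.filter (fun kv => kv.1 ≠ k)) d
      = d.filter (fun kv => decide (kv.1 ∉ ks)) := by
  induction ks generalizing d with
  | nil => simp
  | cons k ks ih =>
    simp only [List.foldl_cons, ih, List.filter_filter]
    apply List.filter_congr
    intro kv _
    by_cases h1 : kv.1 = k <;> simp [h1]

-- With distinct keys, lookup of a key of a member pair returns that pair's value.
theorem lookup_mem_nodup (d : List (String × Int)) (kv : String × Int)
    (hnd : (d.map Prod.fst).Nodup) (hmem : kv ∈ d) :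
    List.lookup kv.1 d = some kv.2 := by
  induction d with
  | nil => cases hmem
  | cons hd tl ih =>
    simp only [List.map_cons, List.nodup_cons] at hnd
    cases hmem with
    | head => simp [List.lookup]
    | tail _ hmem =>
      have hne : hd.1 ≠ kv.1 := by
        intro h
        exact hnd.1 (h ▸ List.mem_map_of_mem hmem)
      simp only [List.lookup, beq_eq_false_iff_ne.mpr (Ne.symm hne)]
      exact ih hnd.2 hmem

theorem remove_value_eq_filter (dictionary : List (String × Int)) (value : Int)
    (hnd : (dictionary.map Prod.fst).Nodup) :
    remove_value dictionary value = dictionary.filter (fun kv => kv.2 != value) := by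
  unfold remove_value
  rw [PySem.List.foldl_append_if
        (fun kv => List.lookup kv.1 dictionary == some value) Prod.fst dictionary []]
  simp only [List.nil_append]
  rw [foldl_filter_key]
  apply List.filter_congr
  intro kv hkv
  have hlk := lookup_mem_nodup dictionary kv hnd hkv
  rw [Bool.eq_iff_iff]
  simp only [decide_eq_true_eq]
  constructor
  · -- kv.1 not in the deletion list → value differs
    intro h
    simp only [List.mem_map, List.mem_filter] at h
    simp only [bne_iff_ne, ne_eq]
    intro hv
    exact h ⟨kv, ⟨hkv, by simp [hlk, hv]⟩, rfl⟩
  · -- value differs → kv.1 not in the deletion list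
    intro h
    simp only [bne_iff_ne, ne_eq] at h
    simp only [List.mem_map, List.mem_filter]
    rintro ⟨kv', ⟨_, heq'⟩, hfst⟩
    simp only [beq_iff_eq] at heq'
    rw [hfst, hlk] at heq'
    exact h (by injection heq')

-- ===== VERDICT (by name: the statement is the Claim_ definition above) =====
theorem remove_value_spec : Claim_equal_remove_value := by
  intro dictionary value _ hpre
  unfold Spec_remove_value remove_value_alt
  exact remove_value_eq_filter dictionary value hpre
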